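-- pv_equiv track=rewrite | github.com/OwlNet-C/CodeWars-Answers | Python/8-kyu/TrainingOnPirates.py | cannons_ready
-- ===== SOURCE A (Python) =====
-- def cannons_ready(gunners):
--     ayetemp = 0
--     for key,value in gunners.items():
--         if value == 'aye':
--             ayetemp +=1
--     if ayetemp == len(gunners):
--         return ("Fire!")
--     else:
--         return ("Shiver me timbers!")
-- ===== SOURCE B (Python) =====
-- def cannons_ready(gunners):
--     return "Fire!" if set(gunners.values()) <= {"aye"} else "Shiver me timbers!"
-- ===== Notes on version B (the rewrite author's own statement) =====
-- stated objective: idiomatic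
-- what changed: Replaces the count-ayes-and-compare-to-len loop with deduplicating the values into a set and a single subset test against {'aye'}.
import Mathlib
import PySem

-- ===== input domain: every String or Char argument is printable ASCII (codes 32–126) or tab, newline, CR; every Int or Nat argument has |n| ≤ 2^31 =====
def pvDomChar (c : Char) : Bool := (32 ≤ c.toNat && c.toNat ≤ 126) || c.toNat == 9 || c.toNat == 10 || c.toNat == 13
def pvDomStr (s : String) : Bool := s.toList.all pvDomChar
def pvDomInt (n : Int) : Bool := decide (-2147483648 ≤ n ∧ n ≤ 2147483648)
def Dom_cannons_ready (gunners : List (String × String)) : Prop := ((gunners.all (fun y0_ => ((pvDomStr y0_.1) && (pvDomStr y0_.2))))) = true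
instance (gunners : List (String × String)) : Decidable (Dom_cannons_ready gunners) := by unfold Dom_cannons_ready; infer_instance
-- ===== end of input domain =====

-- B is the idiomatic set-subset formulation: distinct values ⊆ {'aye'}; A counts 'aye' values and compares with the length.

-- ===== PORT A =====
def cannons_ready (gunners : List (String × String)) : String :=
  let ayetemp : Int :=
    gunners.foldl (fun acc kv => if kv.2 == "aye" then acc + 1 else acc) 0
  if ayetemp = (gunners.length : Int) then "Fire!" else "Shiver me timbers!"

-- ===== PORT B =====
def cannons_ready_alt (gunners : List (String × String)) : String :=
  if PySem.Set.issubset (PySem.Set.ofList (gunners.map Prod.snd)) ["aye"] then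
    "Fire!"
  else "Shiver me timbers!"

-- ===== PRECONDITION & SPEC =====
def Spec_cannons_ready (gunners : List (String × String)) (out : String) : Prop := out = cannons_ready_alt gunners
instance (gunners : List (String × String)) (out : String) : Decidable (Spec_cannons_ready gunners out) := by unfold Spec_cannons_ready; infer_instance

-- ===== CLAIM (what is proved, stated in full; the proofs are below) =====
def Claim_equal_cannons_ready : Prop := ∀ (gunners : List (String × String)), Dom_cannons_ready gunners → Spec_cannons_ready gunners (cannons_ready gunners)

-- ===== LEMMAS AND PROOFS =====

theorem cannons_ready_count (gunners : List (String × String)) (c : Int) :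
    gunners.foldl (fun acc kv => if kv.2 == "aye" then acc + 1 else acc) c
      = c + (gunners.countP (fun kv => kv.2 == "aye") : Int) := by
  induction gunners generalizing c with
  | nil => simp
  | cons kv rest ih =>
    simp only [List.foldl, List.countP_cons]
    by_cases h : kv.2 == "aye"
    · rw [if_pos h, ih]; simp only [h, if_true]; push_cast; ring
    · rw [if_neg h, ih]; simp only [h]; push_cast; ring

theorem cannons_ready_iff (gunners : List (String × String)) :
    (gunners.countP (fun kv => kv.2 == "aye") = gunners.length)
      ↔ (∀ v ∈ gunners.map Prod.snd, v ∈ (["aye"] : List String)) := by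
  rw [List.countP_eq_length]
  constructor
  · intro h v hv
    obtain ⟨kv, hkv, rfl⟩ := List.mem_map.mp hv
    simpa using h kv hkv
  · intro h kv hkv
    have := h kv.2 (List.mem_map.mpr ⟨kv, hkv, rfl⟩)
    simpa using this

-- ===== VERDICT (by name: the statement is the Claim_ definition above) =====
theorem cannons_ready_spec : Claim_equal_cannons_ready := by
  intro gunners _
  unfold Spec_cannons_ready cannons_ready cannons_ready_alt
  rw [cannons_ready_count]
  by_cases h : ∀ v ∈ gunners.map Prod.snd, v ∈ (["aye"] : List String)
  · have hc : gunners.countP (fun kv => kv.2 == "aye") = gunners.length :=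
      (cannons_ready_iff gunners).mpr h
    have hs : PySem.Set.issubset (PySem.Set.ofList (gunners.map Prod.snd)) ["aye"] = true := by
      rw [PySem.Set.issubset_iff _ _]
      intro x hx
      exact h x ((PySem.Set.mem_ofList _ x).mp hx)
    simp [hc, hs]
  · have hc : gunners.countP (fun kv => kv.2 == "aye") ≠ gunners.length := by
      intro hc; exact h ((cannons_ready_iff gunners).mp hc)
    have hs : PySem.Set.issubset (PySem.Set.ofList (gunners.map Prod.snd)) ["aye"] ≠ true := by
      intro hs
      apply h
      intro v hv
      exact (PySem.Set.issubset_iff _ _).mp hs v ((PySem.Set.mem_ofList _ v).mpr hv)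
    have hcz : (0 : Int) + (gunners.countP (fun kv => kv.2 == "aye") : Int) ≠ (gunners.length : Int) := by
      intro he; apply hc; omega
    simp only [hcz, if_false, hs]
    simp
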